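-- pv_equiv track=rewrite | github.com/chouxiaozi1989/sum_positive_differences | sum_positive_differences.py | calculate_positive_differences_sum_advanced
-- ===== SOURCE A (Python) =====
-- from typing import List
--
-- def calculate_positive_differences_sum_optimized(arr: List[int]) -> int:
--     """
--     优化算法：O(n log n)时间复杂度
--     使用排序和数学技巧来优化计算
--     """
--     n = len(arr)
--     total_sum = 0
--
--     # 对于每个位置j，计算所有满足条件的a[j]-a[i]的和
--     for j in range(1, n):
--         for i in range(j):
--             diff = arr[j] - arr[i]
--             if diff > 0:
--                 total_sum += diff
--
--     return total_sum
--
-- def calculate_positive_differences_sum_advanced(arr: List[int]) -> int: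
--     """
--     高级优化算法：使用归并排序的思想
--     在排序过程中计算逆序对的贡献
--     """
--     def merge_and_count(arr, temp, left, mid, right):
--         i, j, k = left, mid + 1, left
--         contribution = 0
--
--         while i <= mid and j <= right:
--             if arr[i] <= arr[j]:
--                 temp[k] = arr[i]
--                 i += 1
--             else:
--                 temp[k] = arr[j]
--                 # arr[j] 比 arr[i] 到 arr[mid] 都小
--                 # 但我们需要的是正差值，所以这里需要重新思考
--                 j += 1
--             k += 1
--
--         while i <= mid:
--             temp[k] = arr[i]
--             i += 1
--             k += 1
--
--         while j <= right:
--             temp[k] = arr[j]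
--             j += 1
--             k += 1
--
--         for i in range(left, right + 1):
--             arr[i] = temp[i]
--
--         return contribution
--
--     def merge_sort_and_count(arr, temp, left, right):
--         contribution = 0
--         if left < right:
--             mid = (left + right) // 2
--             contribution += merge_sort_and_count(arr, temp, left, mid)
--             contribution += merge_sort_and_count(arr, temp, mid + 1, right)
--             contribution += merge_and_count(arr, temp, left, mid, right)
--         return contribution
--
--     # 由于归并排序方法比较复杂，我们使用更直接的优化方法
--     return calculate_positive_differences_sum_optimized(arr)
-- ===== SOURCE B (Python) =====
-- from typing import List
--
-- def calculate_positive_differences_sum_advanced(arr: List[int]) -> int: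
--     """Sum of arr[j]-arr[i] over i<j with arr[j]>arr[i], via merge sort.
--
--     During each merge of an earlier-indices half L with a later-indices half R
--     (both sorted), every element y popped from R pairs with the elements of L
--     popped strictly before it (ties pop from R first, so those are exactly the
--     L-elements smaller than y), contributing y*count - sum of them.
--     """
--     def msort(xs):
--         # returns (sorted xs, contribution of pairs inside xs)
--         n = len(xs)
--         if n <= 1:
--             return xs, 0
--         left, cl = msort(xs[: n // 2])
--         right, cr = msort(xs[n // 2:])
--         merged, cm = merge_count(left, right)
--         return merged, cl + cr + cm
--
--     def merge_count(left, right):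
--         merged = []
--         total = 0
--         cnt = 0       # elements of `left` already merged
--         s = 0         # their sum
--         i = j = 0
--         while i < len(left) and j < len(right):
--             if right[j] <= left[i]:
--                 total += right[j] * cnt - s
--                 merged.append(right[j])
--                 j += 1
--             else:
--                 cnt += 1
--                 s += left[i]
--                 merged.append(left[i])
--                 i += 1
--         while j < len(right):
--             total += right[j] * cnt - s
--             merged.append(right[j])
--             j += 1
--         merged.extend(left[i:])
--         return merged, total
--
--     return msort(arr)[1]
-- ===== Notes on version B (the rewrite author's own statement) =====
-- stated objective: faster
-- what changed: Replaces A's quadratic double loop over index pairs by a merge-sort that accumulates, during each merge of an earlier half with a later half, the contribution of all cross pairs (count and running sum of already-merged left elements), giving O(n log n).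
import Mathlib
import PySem

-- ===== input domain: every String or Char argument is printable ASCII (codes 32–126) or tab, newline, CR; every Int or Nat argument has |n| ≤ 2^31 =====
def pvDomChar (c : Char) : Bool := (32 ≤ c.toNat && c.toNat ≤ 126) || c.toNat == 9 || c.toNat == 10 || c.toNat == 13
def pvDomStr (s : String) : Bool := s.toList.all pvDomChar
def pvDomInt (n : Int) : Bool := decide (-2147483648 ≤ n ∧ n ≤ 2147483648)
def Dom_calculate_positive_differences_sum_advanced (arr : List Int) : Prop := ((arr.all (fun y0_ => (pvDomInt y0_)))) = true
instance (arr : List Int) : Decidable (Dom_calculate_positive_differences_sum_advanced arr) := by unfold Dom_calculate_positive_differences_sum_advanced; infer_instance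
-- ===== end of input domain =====

-- B replaces A's O(n^2) double loop by a merge-sort accumulating cross-pair contributions (O(n log n)).

-- ===== PORT A =====
-- A delegates to calculate_positive_differences_sum_optimized: nested loops over j in range(1,n), i in range(j).
def calculate_positive_differences_sum_advanced (arr : List Int) : Int :=
  let n : Int := arr.length
  (PySem.List.pyRange 1 n 1).foldl (fun total_sum j =>
    (PySem.List.pyRange 0 j 1).foldl (fun t i =>
      let diff := PySem.List.pyGetD arr j 0 - PySem.List.pyGetD arr i 0
      if diff > 0 then t + diff else t) total_sum) 0

-- ===== PORT B =====
-- merge_count of Source B: merges sorted `left` (earlier indices) with sorted `right` (later indices);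
-- cnt/s are the count and sum of left elements already merged; each right element y merged
-- contributes y*cnt - s (the left elements already merged are exactly those < y).
-- The Nat argument is fuel (= |left| + |right| at the call site), only a structural-recursion guard.
def pvMergeCount : Nat → List Int → List Int → Int → Int → List Int × Int
  | _, [], right, cnt, s => (right, right.foldl (fun t y => t + (y * cnt - s)) 0)
  | _, l :: ls, [], _, _ => (l :: ls, 0)
  | 0, _ :: _, _ :: _, _, _ => ([], 0)
  | fuel + 1, l :: ls, r :: rs, cnt, s =>
    if r ≤ l then
      let p := pvMergeCount fuel (l :: ls) rs cnt s
      (r :: p.1, p.2 + (r * cnt - s))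
    else
      let p := pvMergeCount fuel ls (r :: rs) (cnt + 1) (s + l)
      (l :: p.1, p.2)

-- msort of Source B (fuel = |xs| at the call site, again only a structural-recursion guard)
def pvMsort : Nat → List Int → List Int × Int
  | 0, xs => (xs, 0)
  | fuel + 1, xs =>
    if xs.length ≤ 1 then (xs, 0)
    else
      let p1 := pvMsort fuel (xs.take (xs.length / 2))
      let p2 := pvMsort fuel (xs.drop (xs.length / 2))
      let m := pvMergeCount (p1.1.length + p2.1.length) p1.1 p2.1 0 0
      (m.1, p1.2 + p2.2 + m.2)

def calculate_positive_differences_sum_advanced_alt (arr : List Int) : Int :=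
  (pvMsort arr.length arr).2

-- ===== PRECONDITION & SPEC =====
def Spec_calculate_positive_differences_sum_advanced (arr : List Int) (out : Int) : Prop := out = calculate_positive_differences_sum_advanced_alt arr
instance (arr : List Int) (out : Int) : Decidable (Spec_calculate_positive_differences_sum_advanced arr out) := by unfold Spec_calculate_positive_differences_sum_advanced; infer_instance

-- ===== CLAIM (what is proved, stated in full; the proofs are below) =====
def Claim_equal_calculate_positive_differences_sum_advanced : Prop := ∀ (arr : List Int), Dom_calculate_positive_differences_sum_advanced arr → Spec_calculate_positive_differences_sum_advanced arr (calculate_positive_differences_sum_advanced arr)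

-- ===== LEMMAS AND PROOFS =====

-- pvH x R = contribution of an earlier element x against later elements R
def pvH (x : Int) (R : List Int) : Int := (R.map (fun y => if 0 < y - x then y - x else 0)).sum

-- cross L R = contribution of all pairs (x earlier in L, y later in R)
def pvCross (L R : List Int) : Int := (L.map (fun x => pvH x R)).sum

-- S = the function's mathematical value: sum over earlier-smaller pairs
def pvS : List Int → Int
  | [] => 0
  | x :: xs => pvH x xs + pvS xs

theorem pvH_perm (x : Int) {R R' : List Int} (h : R.Perm R') : pvH x R = pvH x R' := by
  unfold pvH; exact (h.map _).sum_eq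

theorem pvH_append (x : Int) (A B : List Int) : pvH x (A ++ B) = pvH x A + pvH x B := by
  unfold pvH; simp

theorem pvCross_nil_left (R : List Int) : pvCross [] R = 0 := rfl

theorem pvCross_nil_right (L : List Int) : pvCross L [] = 0 := by
  unfold pvCross pvH; induction L with
  | nil => rfl
  | cons a l ih => simp_all

theorem pvCross_cons_left (a : Int) (L R : List Int) :
    pvCross (a :: L) R = pvH a R + pvCross L R := by
  unfold pvCross; simp

theorem pvCross_append_right (L A B : List Int) :
    pvCross L (A ++ B) = pvCross L A + pvCross L B := by
  induction L with
  | nil => rfl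
  | cons a l ih => simp [pvCross_cons_left, pvH_append, ih]; ring

theorem pvCross_append_left (A B R : List Int) :
    pvCross (A ++ B) R = pvCross A R + pvCross B R := by
  unfold pvCross; simp

theorem pvCross_perm {L L' R R' : List Int} (hL : L.Perm L') (hR : R.Perm R') :
    pvCross L R = pvCross L' R' := by
  have h1 : pvCross L R = pvCross L R' := by
    unfold pvCross
    have : (fun x => pvH x R) = (fun x => pvH x R') := funext fun x => pvH_perm x hR
    rw [this]
  rw [h1]; unfold pvCross; exact (hL.map _).sum_eq

theorem pvS_append (L R : List Int) : pvS (L ++ R) = pvS L + pvS R + pvCross L R := by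
  induction L with
  | nil => simp [pvS, pvCross_nil_left]
  | cons a l ih =>
    simp only [List.cons_append, pvS, ih, pvH_append, pvCross_cons_left]
    ring

-- all elements of P are below r: pvCross P [r] is the closed form r*|P| - sum P
theorem pvCross_singleton_of_lt {P : List Int} {r : Int} (h : ∀ x ∈ P, x < r) :
    pvCross P [r] = r * P.length - P.sum := by
  induction P with
  | nil => simp [pvCross_nil_left]
  | cons a l ih =>
    have ha : a < r := h a (by simp)
    rw [pvCross_cons_left, ih (fun x hx => h x (by simp [hx]))]
    unfold pvH
    simp only [List.map_cons, List.map_nil, List.sum_cons, List.sum_nil]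
    have : 0 < r - a := by omega
    rw [if_pos this]
    push_cast [List.length_cons]
    ring

theorem pvCross_singleton_zero {P : List Int} {r : Int} (h : ∀ x ∈ P, r ≤ x) :
    pvCross P [r] = 0 := by
  induction P with
  | nil => rfl
  | cons a l ih =>
    rw [pvCross_cons_left, ih (fun x hx => h x (by simp [hx]))]
    have ha : r ≤ a := h a (by simp)
    unfold pvH
    simp only [List.map_cons, List.map_nil, List.sum_cons, List.sum_nil]
    rw [if_neg (by omega)]
    ring

theorem pvCross_drain (P R : List Int) (h : ∀ x ∈ P, ∀ y ∈ R, x < y) :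
    (R.map (fun y => y * (P.length : Int) - P.sum)).sum = pvCross P R := by
  induction R with
  | nil => simp [pvCross_nil_right]
  | cons y R' ih =>
    have hy : pvCross P (y :: R') = pvCross P [y] + pvCross P R' := by
      have : (y :: R') = [y] ++ R' := rfl
      rw [this, pvCross_append_right]
    rw [hy, ← ih (fun x hx z hz => h x hx z (by simp [hz])),
        pvCross_singleton_of_lt (fun x hx => h x hx y (by simp))]
    simp

theorem pvFoldDrain (R : List Int) (cnt s init : Int) :
    R.foldl (fun t y => t + (y * cnt - s)) init = init + (R.map (fun y => y * cnt - s)).sum := by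
  induction R generalizing init with
  | nil => simp
  | cons a l ih => simp [ih]; ring

theorem pvMergeCount_fst (fuel : Nat) : ∀ (L R : List Int) (cnt s : Int),
    L.length + R.length ≤ fuel →
    (pvMergeCount fuel L R cnt s).1.Perm (L ++ R) ∧
      (L.Pairwise (· ≤ ·) → R.Pairwise (· ≤ ·) → (pvMergeCount fuel L R cnt s).1.Pairwise (· ≤ ·)) := by
  induction fuel with
  | zero =>
    intro L R cnt s h
    match L, R with
    | [], R => simp [pvMergeCount]
    | l :: ls, [] => simp [pvMergeCount]
    | l :: ls, r :: rs => simp at h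
  | succ n ih =>
    intro L R cnt s hlen
    match L, R with
    | [], R => simp [pvMergeCount]
    | l :: ls, [] => simp [pvMergeCount]
    | l :: ls, r :: rs =>
      by_cases hle : r ≤ l
      · simp only [pvMergeCount, if_pos hle]
        have ihh := ih (l :: ls) rs cnt s (by simp at hlen ⊢; omega)
        constructor
        · exact (ihh.1.cons r).trans List.perm_middle.symm
        · intro hL hR
          rw [List.pairwise_cons]
          refine ⟨?_, ihh.2 hL (List.pairwise_cons.mp hR).2⟩
          intro b hb
          have hb' := (ihh.1.mem_iff).mp hb
          simp only [List.mem_append, List.mem_cons] at hb'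
          rcases hb' with (rfl | hbls) | hbrs
          · exact hle
          · exact le_trans hle ((List.pairwise_cons.mp hL).1 b hbls)
          · exact (List.pairwise_cons.mp hR).1 b hbrs
      · simp only [pvMergeCount, if_neg hle]
        have hlr : l < r := by omega
        have ihh := ih ls (r :: rs) (cnt + 1) (s + l) (by simp at hlen ⊢; omega)
        constructor
        · exact ihh.1.cons l
        · intro hL hR
          rw [List.pairwise_cons]
          refine ⟨?_, ihh.2 (List.pairwise_cons.mp hL).2 hR⟩
          intro b hb
          have hb' := (ihh.1.mem_iff).mp hb
          simp only [List.mem_append, List.mem_cons] at hb'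
          rcases hb' with hbls | (rfl | hbrs)
          · exact (List.pairwise_cons.mp hL).1 b hbls
          · exact le_of_lt hlr
          · exact le_trans (le_of_lt hlr) ((List.pairwise_cons.mp hR).1 b hbrs)

theorem pvMergeCount_snd (fuel : Nat) : ∀ (L R P : List Int), L.length + R.length ≤ fuel →
    L.Pairwise (· ≤ ·) → R.Pairwise (· ≤ ·) → (∀ x ∈ P, ∀ y ∈ R, x < y) →
    (pvMergeCount fuel L R (P.length : Int) P.sum).2 = pvCross P R + pvCross L R := by
  induction fuel with
  | zero =>
    intro L R P hlen hL hR hP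
    match L, R with
    | [], R =>
      have e : (pvMergeCount 0 [] R ((P.length : Int)) P.sum).2
          = R.foldl (fun t y => t + (y * (P.length : Int) - P.sum)) 0 := by
        simp [pvMergeCount]
      rw [e, pvFoldDrain, pvCross_drain P R hP, pvCross_nil_left]
      ring
    | l :: ls, [] =>
      have e : (pvMergeCount 0 (l :: ls) [] ((P.length : Int)) P.sum).2 = 0 := by
        simp [pvMergeCount]
      rw [e, pvCross_nil_right, pvCross_nil_right]
      ring
    | l :: ls, r :: rs => simp at hlen
  | succ n ih =>
    intro L R P hlen hL hR hP
    match L, R with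
    | [], R =>
      have e : (pvMergeCount (n + 1) [] R ((P.length : Int)) P.sum).2
          = R.foldl (fun t y => t + (y * (P.length : Int) - P.sum)) 0 := by
        simp [pvMergeCount]
      rw [e, pvFoldDrain, pvCross_drain P R hP, pvCross_nil_left]
      ring
    | l :: ls, [] =>
      have e : (pvMergeCount (n + 1) (l :: ls) [] ((P.length : Int)) P.sum).2 = 0 := by
        simp [pvMergeCount]
      rw [e, pvCross_nil_right, pvCross_nil_right]
      ring
    | l :: ls, r :: rs =>
      by_cases hle : r ≤ l
      · simp only [pvMergeCount, if_pos hle]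
        have hR' := (List.pairwise_cons.mp hR).2
        have hP' : ∀ x ∈ P, ∀ y ∈ rs, x < y := fun x hx y hy => hP x hx y (by simp [hy])
        have hrec := ih (l :: ls) rs P (by simp at hlen ⊢; omega) hL hR' hP'
        rw [hrec]
        have h1 : pvCross P (r :: rs) = pvCross P [r] + pvCross P rs := by
          rw [show (r :: rs) = [r] ++ rs from rfl, pvCross_append_right]
        have h2 : pvCross P [r] = r * (P.length : Int) - P.sum :=
          pvCross_singleton_of_lt (fun x hx => hP x hx r (by simp))
        have h3 : pvCross (l :: ls) (r :: rs) = pvCross (l :: ls) rs := by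
          rw [show (r :: rs) = [r] ++ rs from rfl, pvCross_append_right]
          have : pvCross (l :: ls) [r] = 0 := by
            refine pvCross_singleton_zero ?_
            intro x hx
            rcases List.mem_cons.mp hx with rfl | hx'
            · exact hle
            · exact le_trans hle ((List.pairwise_cons.mp hL).1 x hx')
          omega
        rw [h1, h2, h3]
        ring
      · simp only [pvMergeCount, if_neg hle]
        have hlr : l < r := by omega
        have hL' := (List.pairwise_cons.mp hL).2
        have hP'' : ∀ x ∈ P ++ [l], ∀ y ∈ r :: rs, x < y := by
          intro x hx y hy
          rcases List.mem_append.mp hx with hx' | hx'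
          · exact hP x hx' y hy
          · have hxl : x = l := by simpa using hx'
            subst hxl
            rcases List.mem_cons.mp hy with rfl | hy'
            · exact hlr
            · exact lt_of_lt_of_le hlr ((List.pairwise_cons.mp hR).1 y hy')
        have hrec := ih ls (r :: rs) (P ++ [l]) (by simp at hlen ⊢; omega) hL' hR hP''
        have e1 : ((P.length : Int) + 1) = (((P ++ [l]).length : Int)) := by simp
        have e2 : (P.sum + l) = (P ++ [l]).sum := by simp
        rw [e1, e2, hrec, pvCross_append_left, pvCross_cons_left, pvCross_cons_left,
            pvCross_nil_left]
        ring

theorem pvMsort_spec (fuel : Nat) : ∀ xs : List Int, xs.length ≤ fuel →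
    (pvMsort fuel xs).1.Perm xs ∧ (pvMsort fuel xs).1.Pairwise (· ≤ ·) ∧
      (pvMsort fuel xs).2 = pvS xs := by
  induction fuel with
  | zero =>
    intro xs h
    have hnil : xs = [] := by cases xs <;> simp_all
    subst hnil
    exact ⟨List.Perm.refl _, List.Pairwise.nil, rfl⟩
  | succ n ih =>
    intro xs hfuel
    by_cases h : xs.length ≤ 1
    · simp only [pvMsort, if_pos h]
      refine ⟨List.Perm.refl xs, ?_, ?_⟩
      · match xs, h with
        | [], _ => exact List.Pairwise.nil
        | [a], _ => simp
      · match xs, h with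
        | [], _ => rfl
        | [a], _ => simp [pvS, pvH]
    · simp only [pvMsort, if_neg h]
      have h1 := ih (xs.take (xs.length / 2)) (by simp [List.length_take]; omega)
      have h2 := ih (xs.drop (xs.length / 2)) (by simp [List.length_drop]; omega)
      obtain ⟨hp1, hs1, hv1⟩ := h1
      obtain ⟨hp2, hs2, hv2⟩ := h2
      have hm := pvMergeCount_fst
        ((pvMsort n (xs.take (xs.length / 2))).1.length + (pvMsort n (xs.drop (xs.length / 2))).1.length)
        (pvMsort n (xs.take (xs.length / 2))).1 (pvMsort n (xs.drop (xs.length / 2))).1 0 0 le_rfl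
      have hperm : (pvMergeCount
          ((pvMsort n (xs.take (xs.length / 2))).1.length + (pvMsort n (xs.drop (xs.length / 2))).1.length)
          (pvMsort n (xs.take (xs.length / 2))).1 (pvMsort n (xs.drop (xs.length / 2))).1 0 0).1.Perm xs := by
        refine hm.1.trans ?_
        refine (hp1.append hp2).trans ?_
        rw [List.take_append_drop]
      refine ⟨hperm, hm.2 hs1 hs2, ?_⟩
      have hsnd : (pvMergeCount
          ((pvMsort n (xs.take (xs.length / 2))).1.length + (pvMsort n (xs.drop (xs.length / 2))).1.length)
          (pvMsort n (xs.take (xs.length / 2))).1 (pvMsort n (xs.drop (xs.length / 2))).1 0 0).2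
          = pvCross (xs.take (xs.length / 2)) (xs.drop (xs.length / 2)) := by
        have := pvMergeCount_snd
          ((pvMsort n (xs.take (xs.length / 2))).1.length + (pvMsort n (xs.drop (xs.length / 2))).1.length)
          (pvMsort n (xs.take (xs.length / 2))).1 (pvMsort n (xs.drop (xs.length / 2))).1 []
          le_rfl hs1 hs2 (by intro x hx; exact absurd hx (List.not_mem_nil))
        simp only [List.length_nil, List.sum_nil, Nat.cast_zero] at this
        rw [this, pvCross_nil_left, zero_add]
        exact pvCross_perm hp1 hp2
      simp only [hsnd, hv1, hv2]
      rw [← pvS_append, List.take_append_drop]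

theorem pvFoldPos (y : Int) (xs : List Int) : ∀ init : Int,
    xs.foldl (fun t v => if 0 < y - v then t + (y - v) else t) init = init + pvCross xs [y] := by
  induction xs with
  | nil => intro init; simp [pvCross_nil_left]
  | cons a l ih =>
    intro init
    simp only [List.foldl_cons, ih, pvCross_cons_left]
    have : pvH a [y] = if 0 < y - a then y - a else 0 := by simp [pvH]
    rw [this]
    split_ifs <;> ring

theorem pvGetD_append (xs : List Int) (y j : Int) (h0 : 0 ≤ j) (h : j < (xs.length : Int)) :
    PySem.List.pyGetD (xs ++ [y]) j 0 = PySem.List.pyGetD xs j 0 := by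
  obtain ⟨n, rfl⟩ := Int.eq_ofNat_of_zero_le h0
  rw [PySem.List.pyGetD_natCast, PySem.List.pyGetD_natCast]
  have hn : n < xs.length := by exact_mod_cast h
  simp [List.getD, List.getElem?_append_left hn]

theorem pvA_eq_pvS (arr : List Int) : calculate_positive_differences_sum_advanced arr = pvS arr := by
  induction arr using List.reverseRecOn with
  | nil => rfl
  | append_singleton xs y ih =>
    by_cases hx : xs = []
    · subst hx
      simp [calculate_positive_differences_sum_advanced, PySem.List.pyRange_one_eq_nil, pvS, pvH]
    · have hlen : 1 ≤ (xs.length : Int) := by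
        have : xs.length ≠ 0 := by simpa [List.length_eq_zero_iff] using hx
        omega
      simp only [calculate_positive_differences_sum_advanced]
      have hn : (((xs ++ [y]).length : Nat) : Int) = (xs.length : Int) + 1 := by
        simp
      rw [hn, PySem.List.pyRange_one_succ_right hlen, List.foldl_append]
      -- first part: the fold over j < xs.length ignores the appended y
      have hfirst :
          (PySem.List.pyRange 1 (xs.length : Int) 1).foldl (fun total_sum j =>
            (PySem.List.pyRange 0 j 1).foldl (fun t i =>
              if PySem.List.pyGetD (xs ++ [y]) j 0 - PySem.List.pyGetD (xs ++ [y]) i 0 > 0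
              then t + (PySem.List.pyGetD (xs ++ [y]) j 0 - PySem.List.pyGetD (xs ++ [y]) i 0)
              else t) total_sum) 0
          = calculate_positive_differences_sum_advanced xs := by
        simp only [calculate_positive_differences_sum_advanced]
        refine PySem.List.foldl_congr_mem _ _ _ _ ?_
        intro acc j hj
        obtain ⟨hj1, hj2⟩ := (PySem.List.mem_pyRange_one).mp hj
        refine PySem.List.foldl_congr_mem _ _ _ _ ?_
        intro t i hi
        obtain ⟨hi1, hi2⟩ := (PySem.List.mem_pyRange_one).mp hi
        rw [pvGetD_append xs y j (by omega) hj2,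
            pvGetD_append xs y i (by omega) (by omega)]
      rw [hfirst]
      -- last step: j = xs.length picks up y against every element of xs
      have hy : PySem.List.pyGetD (xs ++ [y]) (xs.length : Int) 0 = y := by
        rw [PySem.List.pyGetD_natCast]
        simp [List.getD]
      have hlast :
          (PySem.List.pyRange 0 (xs.length : Int) 1).foldl (fun t i =>
            if PySem.List.pyGetD (xs ++ [y]) (xs.length : Int) 0 - PySem.List.pyGetD (xs ++ [y]) i 0 > 0
            then t + (PySem.List.pyGetD (xs ++ [y]) (xs.length : Int) 0 - PySem.List.pyGetD (xs ++ [y]) i 0)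
            else t) (calculate_positive_differences_sum_advanced xs)
          = calculate_positive_differences_sum_advanced xs + pvCross xs [y] := by
        have hcong :
            (PySem.List.pyRange 0 (xs.length : Int) 1).foldl (fun t i =>
              if PySem.List.pyGetD (xs ++ [y]) (xs.length : Int) 0 - PySem.List.pyGetD (xs ++ [y]) i 0 > 0
              then t + (PySem.List.pyGetD (xs ++ [y]) (xs.length : Int) 0 - PySem.List.pyGetD (xs ++ [y]) i 0)
              else t) (calculate_positive_differences_sum_advanced xs)
            = (PySem.List.pyRange 0 (xs.length : Int) 1).foldl (fun t i =>
              if 0 < y - PySem.List.pyGetD xs i 0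
              then t + (y - PySem.List.pyGetD xs i 0)
              else t) (calculate_positive_differences_sum_advanced xs) := by
          refine PySem.List.foldl_congr_mem _ _ _ _ ?_
          intro t i hi
          obtain ⟨hi1, hi2⟩ := (PySem.List.mem_pyRange_one).mp hi
          rw [hy, pvGetD_append xs y i hi1 hi2]
        rw [hcong,
            PySem.List.foldl_pyRange_zero_pyGetD' xs 0
              (fun t v => if 0 < y - v then t + (y - v) else t)
              (calculate_positive_differences_sum_advanced xs),
            pvFoldPos]
      simp only [List.foldl_cons, List.foldl_nil]
      rw [hlast, ih, pvS_append]
      simp [pvS, pvH]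

-- ===== VERDICT (by name: the statement is the Claim_ definition above) =====
theorem calculate_positive_differences_sum_advanced_spec : Claim_equal_calculate_positive_differences_sum_advanced := by
  intro arr _
  unfold Spec_calculate_positive_differences_sum_advanced calculate_positive_differences_sum_advanced_alt
  rw [pvA_eq_pvS, (pvMsort_spec arr.length arr le_rfl).2.2]
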